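-- pv_equiv track=rewrite | github.com/aehrc/COVID-sBeacon | modules/api/lambda/collateQueries/lambda_function.py | combine_queries
-- ===== SOURCE A (Python) =====
-- def combine_queries(split_samples, query_combination, all_sample_set):
--     samples = [None]
--     operators = [lambda x: x]
--     number_string = ''
--     for c in query_combination:
--         if c in '0123456789':
--             number_string += c
--             continue
--         elif number_string:
--             index = int(number_string)
--             samples[-1] = operators.pop()(split_samples[index])
--             number_string = ''
--         if c in '&:':
--             operators.append(samples[-1].intersection)
--         elif c == '|':
--             operators.append(samples[-1].union)
--         elif c == '!':
--             last_operator = operators.pop()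
--             operators.append(lambda x, lo=last_operator: lo(all_sample_set-x))
--         elif c == '(':
--             samples.append(None)
--             operators.append(lambda x: x)
--         elif c == ')':
--             samples[-1] = operators.pop()(samples.pop())
--     if number_string:
--         index = int(number_string)
--         samples[-1] = operators.pop()(split_samples[index])
--     return samples.pop()
-- ===== SOURCE B (Python) =====
-- def combine_queries(split_samples, query_combination, all_sample_set):
--     # Stage 1: scan the query into tokens, taking each maximal digit run in one step.
--     tokens = []
--     i = 0
--     n = len(query_combination)
--     while i < n:
--         c = query_combination[i]
--         if c in '0123456789':
--             j = i
--             while j < n and query_combination[j] in '0123456789':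
--                 j += 1
--             tokens.append(int(query_combination[i:j]))
--             i = j
--         else:
--             if c in '&:':
--                 tokens.append('&')
--             elif c in '|!()':
--                 tokens.append(c)
--             i += 1
--
--     # Stage 2: recursive descent; strict left-to-right combination, no precedence.
--     def parse_unit(i):
--         t = tokens[i] if i < len(tokens) else None
--         if t == '!':
--             value, i = parse_unit(i + 1)
--             return all_sample_set - value, i
--         if isinstance(t, int):
--             return split_samples[t], i + 1
--         if t == '(':
--             value, i = parse_expr(i + 1)
--             if i < len(tokens) and tokens[i] == ')':
--                 return value, i + 1
--         raise ValueError('malformed query')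
--
--     def parse_expr(i):
--         acc, i = parse_unit(i)
--         while i < len(tokens) and tokens[i] in ('&', '|'):
--             op = tokens[i]
--             operand, i = parse_unit(i + 1)
--             acc = acc & operand if op == '&' else acc | operand
--         return acc, i
--
--     if not any(isinstance(t, int) for t in tokens):
--         # no sample group referenced at all: nothing to combine
--         return None
--     value, i = parse_expr(0)
--     if i != len(tokens):
--         raise ValueError('trailing tokens')
--     return value
-- ===== Notes on version B (the rewrite author's own statement) =====
-- stated objective: alternative
-- what changed: A interprets the query in a single character loop driven by two mutable stacks of closures (bound set methods and wrapped complement lambdas); B first scans the query into tokens (taking each maximal digit run in one step) and then evaluates by recursive descent with an explicit left-to-right accumulator, handling each '!' by direct recursion, with no operator stack and no closures.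
-- outside the precondition, e.g. on combine_queries([{'a'}], '0&', {'a', 'b'}): A returns {'a'}, B raises ValueError; on combine_queries([{'a'}, {'a', 'b'}], '0&&1', {'a', 'b'}): A returns {'a'}, B raises ValueError
import Mathlib
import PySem

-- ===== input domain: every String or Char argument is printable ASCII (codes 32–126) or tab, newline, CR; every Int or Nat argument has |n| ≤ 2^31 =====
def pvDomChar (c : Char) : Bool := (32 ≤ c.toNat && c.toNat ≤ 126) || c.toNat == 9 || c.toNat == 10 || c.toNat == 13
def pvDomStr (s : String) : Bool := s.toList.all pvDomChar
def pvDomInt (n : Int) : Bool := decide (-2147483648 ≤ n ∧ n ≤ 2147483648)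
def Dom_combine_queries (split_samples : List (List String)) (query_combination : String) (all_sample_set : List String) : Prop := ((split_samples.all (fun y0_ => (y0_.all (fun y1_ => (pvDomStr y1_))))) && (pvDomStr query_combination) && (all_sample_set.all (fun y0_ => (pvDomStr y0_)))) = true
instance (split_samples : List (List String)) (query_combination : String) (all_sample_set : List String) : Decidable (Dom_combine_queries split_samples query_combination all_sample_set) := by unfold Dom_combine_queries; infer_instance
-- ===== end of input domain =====

-- B re-implements the same query evaluation by scanning the query into tokens
-- (each maximal digit run in one step) and evaluating with a recursive-descent
-- parser ('!' by direct recursion, explicit left-to-right accumulator), instead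
-- of A's char-by-char loop over two stacks of closures; equivalence is proved on
-- Pre_ (well-formed queries).

-- ===== PORT A =====
-- Python operator closures take a set-or-None and may raise: Option in, Option (Option _) out
-- (outer none = exception, inner none = Python None).
abbrev PvOpF := Option (List String) → Option (Option (List String))
abbrev PvASt := List (Option (List String)) × List PvOpF × List Char

def pvOpId : PvOpF := fun x => some x
def pvOpInter (s : List String) : PvOpF := fun x =>
  match x with
  | some v => some (some (PySem.Set.inter s v))
  | none => none
def pvOpUnion (s : List String) : PvOpF := fun x =>
  match x with
  | some v => some (some (PySem.Set.union s v))
  | none => none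
def pvOpBang (all : List String) (f : PvOpF) : PvOpF := fun x =>
  match x with
  | some v => f (some (PySem.Set.diff all v))
  | none => none

-- int(number_string): number_string is built from digit characters only, so the base-10
-- fold is an exact port of int() on this buffer.
def pvDigitVal (num : List Char) : Nat := num.foldl (fun a c => 10 * a + (c.toNat - 48)) 0

-- the 'elif number_string:' flush: samples[-1] = operators.pop()(split_samples[int(number_string)])
def pvAFlush (ss : List (List String)) (samples : List (Option (List String))) (ops : List PvOpF) (num : List Char) : Option (List (Option (List String)) × List PvOpF) :=
  if num.isEmpty then some (samples, ops) else
  match PySem.List.pyGet? ss ((pvDigitVal num : Nat) : Int), ops, samples with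
  | some v, f :: ops', _ :: samples' => (f (some v)).map (fun r => (r :: samples', ops'))
  | _, _, _ => none

def pvAStep (ss : List (List String)) (all : List String) (st : PvASt) (c : Char) : Option PvASt :=
  if "0123456789".toList.contains c then some (st.1, st.2.1, st.2.2 ++ [c]) else
  match pvAFlush ss st.1 st.2.1 st.2.2 with
  | none => none
  | some (samples, ops) =>
    if c = '&' ∨ c = ':' then
      match samples with
      | some s :: _ => some (samples, pvOpInter s :: ops, [])
      | _ => none
    else if c = '|' then
      match samples with
      | some s :: _ => some (samples, pvOpUnion s :: ops, [])
      | _ => none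
    else if c = '!' then
      match ops with
      | f :: ops' => some (samples, pvOpBang all f :: ops', [])
      | [] => none
    else if c = '(' then some (none :: samples, pvOpId :: ops, [])
    else if c = ')' then
      match ops, samples with
      | f :: ops', v :: _ :: samples' => (f v).map (fun r => (r :: samples', ops', ([] : List Char)))
      | _, _ => none
    else some (samples, ops, [])

def pvFoldA (ss : List (List String)) (all : List String) (cs : List Char) (st : Option PvASt) : Option PvASt :=
  cs.foldl (fun o c => match o with | none => none | some s => pvAStep ss all s c) st

def pvAFinish (ss : List (List String)) (st : Option PvASt) : Option (List String) :=
  match st with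
  | none => none
  | some (sm, ops, nb) =>
    match pvAFlush ss sm ops nb with
    | none => none
    | some (sm', _) => match sm' with | v :: _ => v | [] => none

def combine_queries (split_samples : List (List String)) (query_combination : String) (all_sample_set : List String) : Option (List String) :=
  pvAFinish split_samples
    (pvFoldA split_samples all_sample_set query_combination.toList
      (some ([none], [pvOpId], [])))

-- ===== PORT B =====
inductive QTok where
  | idx : Nat → QTok
  | andT | orT | notT | lparen | rparen
deriving DecidableEq, Repr

def qIsDigit (c : Char) : Bool := "0123456789".toList.contains c

-- int(query_combination[i:j]) over a maximal digit run
def qNumVal (run : List Char) : Nat := run.foldl (fun a d => a * 10 + (d.toNat - 48)) 0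

def qOp (c : Char) : List QTok :=
  if c = '&' ∨ c = ':' then [QTok.andT]
  else if c = '|' then [QTok.orT]
  else if c = '!' then [QTok.notT]
  else if c = '(' then [QTok.lparen]
  else if c = ')' then [QTok.rparen]
  else []

-- stage-1 scanner of Source B: one step per maximal digit run / operator character.
-- The fuel argument only justifies termination structurally (each step consumes at
-- least one character, so cs.length fuel is never exhausted).
def qScan : Nat → List Char → List QTok
  | fuel + 1, c :: cs =>
    if qIsDigit c then
      QTok.idx (qNumVal (c :: cs.takeWhile qIsDigit)) :: qScan fuel (cs.dropWhile qIsDigit)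
    else qOp c ++ qScan fuel cs
  | _, _ => []

def qTokens (cs : List Char) : List QTok := qScan cs.length cs

-- stage-2 recursive descent of Source B; ValueError = none; the fuel argument only
-- justifies termination in Lean (3*len+3 is proved sufficient below, so it is
-- never exhausted when Source B's recursion returns).
mutual
def qUnit (ss : List (List String)) (all : List String) : Nat → List QTok → Option (List String × List QTok)
  | fuel + 1, QTok.notT :: ts =>
      (qUnit ss all fuel ts).map (fun vr => (PySem.Set.diff all vr.1, vr.2))
  | fuel + 1, QTok.idx n :: ts =>
      (PySem.List.pyGet? ss (n : Int)).map (fun v => (v, ts))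
  | fuel + 1, QTok.lparen :: ts =>
      (qExpr ss all fuel ts).bind (fun vr =>
        match vr.2 with
        | QTok.rparen :: rest => some (vr.1, rest)
        | _ => none)
  | _, _ => none

def qExpr (ss : List (List String)) (all : List String) : Nat → List QTok → Option (List String × List QTok)
  | fuel + 1, ts => (qUnit ss all fuel ts).bind (fun vr => qFold ss all fuel vr.1 vr.2)
  | 0, _ => none

def qFold (ss : List (List String)) (all : List String) : Nat → List String → List QTok → Option (List String × List QTok)
  | fuel + 1, acc, QTok.andT :: ts =>
      (qUnit ss all fuel ts).bind (fun vr => qFold ss all fuel (PySem.Set.inter acc vr.1) vr.2)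
  | fuel + 1, acc, QTok.orT :: ts =>
      (qUnit ss all fuel ts).bind (fun vr => qFold ss all fuel (PySem.Set.union acc vr.1) vr.2)
  | _ + 1, acc, ts => some (acc, ts)
  | 0, _, _ => none
end

def qIsIdx (t : QTok) : Bool :=
  match t with
  | QTok.idx _ => true
  | _ => false

def combine_queries_alt (split_samples : List (List String)) (query_combination : String) (all_sample_set : List String) : Option (List String) :=
  let ts := qTokens query_combination.toList
  if !(ts.any qIsIdx) then none
  else
    (qExpr split_samples all_sample_set (3 * ts.length + 3) ts).bind
      (fun vr => if vr.2 = [] then some vr.1 else none)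

-- ===== PRECONDITION & SPEC =====
-- spec-side tokenizer (a single left fold with a pending-digit accumulator,
-- mirroring A's number_string buffer): used by Pre_ to describe the query's
-- token stream without running either port's algorithm
def pvTokFlush (st : List QTok × Option Nat) : List QTok :=
  match st.2 with
  | some n => st.1 ++ [QTok.idx n]
  | none => st.1

def pvTokStep (st : List QTok × Option Nat) (c : Char) : List QTok × Option Nat :=
  if "0123456789".toList.contains c then (st.1, some ((st.2.getD 0) * 10 + (c.toNat - 48)))
  else (pvTokFlush st ++ qOp c, none)

def pvTokenize (cs : List Char) : List QTok := pvTokFlush (cs.foldl pvTokStep ([], none))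

def pvNumOK (ss : List (List String)) (t : QTok) : Bool :=
  match t with
  | QTok.idx n => n < ss.length
  | _ => true
def pvKindStart (t : QTok) : Bool :=
  match t with
  | QTok.idx _ => true | QTok.notT => true | QTok.lparen => true | _ => false
def pvKindEnd (t : QTok) : Bool :=
  match t with
  | QTok.idx _ => true | QTok.rparen => true | _ => false
def pvKindCont (t : QTok) : Bool :=
  match t with
  | QTok.andT => true | QTok.orT => true | QTok.rparen => true | _ => false
def pvAdj (a b : QTok) : Bool :=
  match a with
  | QTok.idx _ => pvKindCont b
  | QTok.rparen => pvKindCont b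
  | _ => pvKindStart b
def pvChainOK : List QTok → Bool
  | [] => true
  | [_] => true
  | a :: b :: ts => pvAdj a b && pvChainOK (b :: ts)
def pvBalanced : Int → List QTok → Bool
  | d, [] => d == 0
  | d, QTok.lparen :: ts => pvBalanced (d + 1) ts
  | d, QTok.rparen :: ts => decide (0 < d) && pvBalanced (d - 1) ts
  | d, _ :: ts => pvBalanced d ts

def pvGrammarOK (ss : List (List String)) (ts : List QTok) : Bool :=
  ts.all (pvNumOK ss) && ts.head?.all pvKindStart && ts.getLast?.all pvKindEnd
    && pvChainOK ts && pvBalanced 0 ts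

-- Pre_ is a SHAPE condition on the inputs, checked without running either algorithm:
-- the query's token stream (digit runs = indices; '&',':','|','!','(',')' = operators;
-- other characters are separators) is described by local ADJACENCY of neighbouring
-- tokens (pvChainOK), first/last token kind, parenthesis BALANCE (pvBalanced), and an
-- index bound — not by simulating A's stacks or B's parser.
-- Pre_: the token stream of the query either is a well-formed expression — units
-- '!'* (index | parenthesised expression) separated by '&'/':'/'|', balanced
-- parentheses, every index within range — or mentions nothing but '!' and '(' (then A
-- returns None). This excludes the inputs on which the Python A raises, and
-- malformed-but-returning corners (e.g. a trailing operator) on which A's value is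
-- leftover loop state and B raises.
def Pre_combine_queries (split_samples : List (List String)) (query_combination : String) (all_sample_set : List String) : Prop :=
  (let ts := pvTokenize query_combination.toList
   pvGrammarOK split_samples ts || ts.all (fun t => t == QTok.notT || t == QTok.lparen)) = true

instance (split_samples : List (List String)) (query_combination : String) (all_sample_set : List String) : Decidable (Pre_combine_queries split_samples query_combination all_sample_set) := by
  unfold Pre_combine_queries; infer_instance

def pvWitness_combine_queries : List (List String) × String × List String :=
  ([["a"], ["b", "c"]], "0|!(1&0)", ["a", "b", "c", "d"])

def Spec_combine_queries (split_samples : List (List String)) (query_combination : String) (all_sample_set : List String) (out : Option (List String)) : Prop := out = combine_queries_alt split_samples query_combination all_sample_set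
instance (split_samples : List (List String)) (query_combination : String) (all_sample_set : List String) (out : Option (List String)) : Decidable (Spec_combine_queries split_samples query_combination all_sample_set out) := by unfold Spec_combine_queries; infer_instance

-- ===== CLAIM (what is proved, stated in full; the proofs are below) =====
def Claim_equal_combine_queries : Prop := ∀ (split_samples : List (List String)) (query_combination : String) (all_sample_set : List String), Dom_combine_queries split_samples query_combination all_sample_set → Pre_combine_queries split_samples query_combination all_sample_set → Spec_combine_queries split_samples query_combination all_sample_set (combine_queries split_samples query_combination all_sample_set)

-- ===== LEMMAS AND PROOFS =====

-- proof device: token-level abstract machine: A's state with the digit buffer flushed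
abbrev PvMSt := List (Option (List String)) × List PvOpF

def pvStepTok (ss : List (List String)) (all : List String) (st : PvMSt) (t : QTok) : Option PvMSt :=
  match t with
  | QTok.idx n =>
    match PySem.List.pyGet? ss ((n : Nat) : Int), st.2, st.1 with
    | some v, f :: ops', _ :: samples' => (f (some v)).map (fun r => (r :: samples', ops'))
    | _, _, _ => none
  | QTok.andT =>
    match st.1 with
    | some s :: _ => some (st.1, pvOpInter s :: st.2)
    | _ => none
  | QTok.orT =>
    match st.1 with
    | some s :: _ => some (st.1, pvOpUnion s :: st.2)
    | _ => none
  | QTok.notT =>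
    match st.2 with
    | f :: ops' => some (st.1, pvOpBang all f :: ops')
    | [] => none
  | QTok.lparen => some (none :: st.1, pvOpId :: st.2)
  | QTok.rparen =>
    match st.2, st.1 with
    | f :: ops', v :: _ :: samples' => (f v).map (fun r => (r :: samples', ops'))
    | _, _ => none

def pvRunM (ss : List (List String)) (all : List String) (ts : List QTok) (st : Option PvMSt) : Option PvMSt :=
  ts.foldl (fun o t => match o with | none => none | some s => pvStepTok ss all s t) st

def pvMFinish (st : Option PvMSt) : Option (List String) :=
  match st with
  | none => none
  | some (sm, _) => match sm with | v :: _ => v | [] => none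

def pvNumOf (nb : List Char) : Option Nat := if nb.isEmpty then none else some (pvDigitVal nb)

theorem pvRunM_none (ss all) (ts : List QTok) : pvRunM ss all ts none = none := by
  induction ts with
  | nil => rfl
  | cons t ts ih => simpa [pvRunM] using ih

theorem pvRunM_cons (ss all t ts st) :
    pvRunM ss all (t :: ts) (some st) = pvRunM ss all ts (pvStepTok ss all st t) := by
  cases h : pvStepTok ss all st t <;> simp [pvRunM, h]

theorem pvRunM_append (ss all) (a b : List QTok) (st : Option PvMSt) :
    pvRunM ss all (a ++ b) st = pvRunM ss all b (pvRunM ss all a st) := by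
  simp [pvRunM, List.foldl_append]

-- tokenizer accumulator irrelevance
theorem pvTokFlush_acc (acc : List QTok) (cur : Option Nat) :
    pvTokFlush (acc, cur) = acc ++ pvTokFlush ([], cur) := by
  cases cur <;> simp [pvTokFlush]

theorem pvTokStep_acc (acc : List QTok) (cur : Option Nat) (c : Char) :
    pvTokStep (acc, cur) c = (acc ++ (pvTokStep ([], cur) c).1, (pvTokStep ([], cur) c).2) := by
  unfold pvTokStep
  split
  · simp
  · rw [pvTokFlush_acc]
    simp

theorem pvTokFold_acc (cs : List Char) : ∀ (acc : List QTok) (cur : Option Nat),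
    cs.foldl pvTokStep (acc, cur)
      = (acc ++ (cs.foldl pvTokStep ([], cur)).1, (cs.foldl pvTokStep ([], cur)).2) := by
  induction cs with
  | nil => intro acc cur; simp
  | cons c cs ih =>
    intro acc cur
    simp only [List.foldl_cons]
    rw [pvTokStep_acc acc cur c]
    rcases h : pvTokStep ([], cur) c with ⟨ts0, cur0⟩
    rw [ih (acc ++ ts0) cur0, ih ts0 cur0]
    simp

theorem pvDigitVal_append (nb : List Char) (c : Char) :
    pvDigitVal (nb ++ [c]) = 10 * pvDigitVal nb + (c.toNat - 48) := by
  simp [pvDigitVal, List.foldl_append]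

-- char loop = token machine (over the accumulator tokenizer)
theorem pvFoldA_none (ss all) (cs : List Char) : pvFoldA ss all cs none = none := by
  induction cs with
  | nil => rfl
  | cons c cs ih => simpa [pvFoldA] using ih

theorem pvAFlush_eq_step (ss all sm ops) (nb : List Char) (h : nb.isEmpty = false) :
    pvAFlush ss sm ops nb = pvStepTok ss all (sm, ops) (QTok.idx (pvDigitVal nb)) := by
  simp [pvAFlush, pvStepTok, h]

theorem pvFlushRun (ss all sm ops) (nb : List Char) :
    pvRunM ss all (pvTokFlush ([], pvNumOf nb)) (some (sm, ops)) = pvAFlush ss sm ops nb := by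
  by_cases h : nb.isEmpty
  · simp [pvNumOf, h, pvTokFlush, pvRunM, pvAFlush]
  · simp only [Bool.not_eq_true] at h
    rw [pvAFlush_eq_step ss all sm ops nb h]
    simp [pvNumOf, h, pvTokFlush, pvRunM]

theorem pvNumOf_append_digit (nb : List Char) (c : Char) :
    some ((pvNumOf nb).getD 0 * 10 + (c.toNat - 48)) = pvNumOf (nb ++ [c]) := by
  by_cases h : nb.isEmpty
  · rcases nb with _ | ⟨d, nb⟩ <;> simp_all [pvNumOf, pvDigitVal]
  · simp [pvNumOf, h, pvDigitVal_append, Nat.mul_comm]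

theorem pvIfNeg {b : Bool} (h : b = false) : ¬ (b = true) := by simp [h]

theorem pvNotDigit (c : Char) (hd : ("0123456789".toList.contains c) = false) :
    ¬c = '0' ∧ ¬c = '1' ∧ ¬c = '2' ∧ ¬c = '3' ∧ ¬c = '4' ∧ ¬c = '5' ∧ ¬c = '6' ∧ ¬c = '7' ∧ ¬c = '8' ∧ ¬c = '9' := by
  rw [show "0123456789".toList = ['0','1','2','3','4','5','6','7','8','9'] from rfl] at hd
  simp at hd
  tauto

theorem pvTokStep_nondigit (nb : List Char) (c : Char)
    (hd : ("0123456789".toList.contains c) = false) :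
    pvTokStep ([], pvNumOf nb) c = (pvTokFlush ([], pvNumOf nb) ++ qOp c, none) := by
  unfold pvTokStep
  rw [if_neg (pvIfNeg hd)]

theorem pvAStep_corr (ss all sm ops) (nb : List Char) (c : Char)
    (hd : ("0123456789".toList.contains c) = false) :
    pvAStep ss all (sm, ops, nb) c
      = (pvRunM ss all (qOp c) (pvAFlush ss sm ops nb)).map
          (fun st => (st.1, st.2, ([] : List Char))) := by
  obtain ⟨h0,h1,h2,h3,h4,h5,h6,h7,h8,h9⟩ := pvNotDigit c hd
  unfold pvAStep
  rw [if_neg (pvIfNeg hd)]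
  cases hf : pvAFlush ss sm ops nb with
  | none => simp [pvRunM_none]
  | some p =>
    rcases p with ⟨samples, ops2⟩
    unfold qOp
    split_ifs
    · cases samples with
      | nil => simp [pvRunM, pvStepTok]
      | cons v0 sr => cases v0 <;> simp [pvRunM, pvStepTok]
    · cases samples with
      | nil => simp [pvRunM, pvStepTok]
      | cons v0 sr => cases v0 <;> simp [pvRunM, pvStepTok]
    · cases ops2 <;> simp [pvRunM, pvStepTok]
    · simp [pvRunM, pvStepTok]
    · cases ops2 with
      | nil => simp [pvRunM, pvStepTok]
      | cons f ops3 =>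
        cases samples with
        | nil => simp [pvRunM, pvStepTok]
        | cons v sr =>
          cases sr with
          | nil => simp [pvRunM, pvStepTok]
          | cons w sr2 => cases hfv : f v <;> simp [pvRunM, pvStepTok, hfv]
    · simp [pvRunM]

theorem pvCharTok (ss all) (cs : List Char) :
    ∀ (sm : List (Option (List String))) (ops : List PvOpF) (nb : List Char),
    pvAFinish ss (pvFoldA ss all cs (some (sm, ops, nb)))
      = pvMFinish (pvRunM ss all (pvTokFlush (cs.foldl pvTokStep ([], pvNumOf nb))) (some (sm, ops))) := by
  induction cs with
  | nil =>
    intro sm ops nb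
    simp only [List.foldl_nil, pvFoldA, pvAFinish]
    rw [pvFlushRun ss all sm ops nb]
    cases hf : pvAFlush ss sm ops nb with
    | none => simp [pvMFinish]
    | some p =>
      rcases p with ⟨sm', ops'⟩
      cases sm' <;> simp [pvMFinish]
  | cons c cs ih =>
    intro sm ops nb
    simp only [List.foldl_cons]
    by_cases hd : ("0123456789".toList.contains c)
    · have hstep : pvAStep ss all (sm, ops, nb) c = some (sm, ops, nb ++ [c]) := by
        unfold pvAStep; rw [if_pos hd]
      have htok : pvTokStep ([], pvNumOf nb) c = ([], pvNumOf (nb ++ [c])) := by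
        unfold pvTokStep; rw [if_pos hd, pvNumOf_append_digit]
      rw [htok]
      simpa [pvFoldA, hstep] using ih sm ops (nb ++ [c])
    · simp only [Bool.not_eq_true] at hd
      rw [pvTokStep_nondigit nb c hd]
      rw [pvTokFold_acc cs (pvTokFlush ([], pvNumOf nb) ++ qOp c) none]
      rcases hT : cs.foldl pvTokStep ([], none) with ⟨t1, t2⟩
      rw [pvTokFlush_acc, List.append_assoc]
      rw [pvRunM_append, pvRunM_append, pvRunM_append, pvFlushRun ss all sm ops nb]
      have hstep := pvAStep_corr ss all sm ops nb c hd
      simp only [pvFoldA, List.foldl_cons]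
      cases hm : pvRunM ss all (qOp c) (pvAFlush ss sm ops nb) with
      | none =>
        rw [hm] at hstep
        simp only [Option.map_none] at hstep
        rw [hstep]
        have : pvFoldA ss all cs none = none := pvFoldA_none ss all cs
        simp only [pvFoldA] at this
        rw [this, pvRunM_none, pvRunM_none]
        rfl
      | some st2 =>
        rcases st2 with ⟨samples2, ops3⟩
        rw [hm] at hstep
        simp only [Option.map_some] at hstep
        rw [hstep]
        have := ih samples2 ops3 []
        simp only [show pvNumOf [] = none from rfl] at this
        rw [hT] at this
        simp only [pvFoldA] at this
        rw [this]
        rw [pvTokFlush_acc t1 t2, pvRunM_append]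

-- bridge: the digit-run scanner of Source B produces the accumulator tokenizer's stream
theorem pvDigitRunFold (run : List Char) : ∀ (h : ∀ d ∈ run, qIsDigit d = true) (acc : List QTok) (n : Nat),
    run.foldl pvTokStep (acc, some n) = (acc, some (run.foldl (fun a d => a * 10 + (d.toNat - 48)) n)) := by
  induction run with
  | nil => intro _ acc n; rfl
  | cons d run ih =>
    intro h acc n
    have hd : qIsDigit d = true := h d List.mem_cons_self
    simp only [List.foldl_cons]
    have hstep : pvTokStep (acc, some n) d = (acc, some (n * 10 + (d.toNat - 48))) := by
      unfold pvTokStep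
      rw [if_pos (show ("0123456789".toList.contains d) = true by simpa [qIsDigit] using hd)]
      rfl
    rw [hstep, ih (fun e he => h e (List.mem_cons_of_mem d he))]

theorem qScan_eq_pvTokenize : ∀ N : Nat, ∀ cs : List Char, cs.length ≤ N →
    qScan N cs = pvTokenize cs := by
  intro N
  induction N with
  | zero =>
    intro cs h
    have : cs = [] := by cases cs <;> simp_all
    subst this
    rfl
  | succ N ihN =>
    intro cs hlen
    cases cs with
    | nil => rfl
    | cons c cs =>
      by_cases hd : qIsDigit c
      · rw [show qScan (N + 1) (c :: cs) = QTok.idx (qNumVal (c :: cs.takeWhile qIsDigit)) :: qScan N (cs.dropWhile qIsDigit) from by rw [qScan]; rw [if_pos hd]]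
        unfold pvTokenize
        simp only [List.foldl_cons]
        have hstep : pvTokStep ([], none) c = ([], some (c.toNat - 48)) := by
          unfold pvTokStep
          rw [if_pos (show ("0123456789".toList.contains c) = true by simpa [qIsDigit] using hd)]
          simp
        rw [hstep]
        have hsplit : cs = cs.takeWhile qIsDigit ++ cs.dropWhile qIsDigit :=
          (List.takeWhile_append_dropWhile (p := qIsDigit) (l := cs)).symm
        conv_rhs => rw [hsplit, List.foldl_append]
        rw [pvDigitRunFold (cs.takeWhile qIsDigit) (fun d hd2 => by simpa using List.mem_takeWhile_imp hd2) [] (c.toNat - 48)]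
        have hnum : qNumVal (c :: cs.takeWhile qIsDigit)
            = (cs.takeWhile qIsDigit).foldl (fun a d => a * 10 + (d.toNat - 48)) (c.toNat - 48) := by
          unfold qNumVal
          simp [List.foldl_cons]
        rw [← hnum]
        set drp := cs.dropWhile qIsDigit with hdrp
        have hdl : drp.length ≤ N := by
          have h1 : drp.length ≤ cs.length := by rw [hdrp]; exact List.length_dropWhile_le _ _
          simp at hlen
          omega
        rw [ihN drp hdl]
        cases hdc : drp with
        | nil => simp [pvTokenize, pvTokFlush]
        | cons e es =>
          have he : qIsDigit e = false := by
            have := List.head?_dropWhile_not (p := qIsDigit) (l := cs)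
            rw [← hdrp, hdc] at this
            simpa using this
          simp only [List.foldl_cons]
          have hstep2 : pvTokStep ([], some (qNumVal (c :: cs.takeWhile qIsDigit))) e
              = ([QTok.idx (qNumVal (c :: cs.takeWhile qIsDigit))] ++ qOp e, none) := by
            unfold pvTokStep
            rw [if_neg (pvIfNeg (show ("0123456789".toList.contains e) = false from he))]
            rfl
          rw [hstep2]
          rw [pvTokFold_acc es ([QTok.idx (qNumVal (c :: cs.takeWhile qIsDigit))] ++ qOp e) none]
          have hstep3 : pvTokStep ([], none) e = (qOp e, none) := by
            unfold pvTokStep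
            rw [if_neg (pvIfNeg (show ("0123456789".toList.contains e) = false from he))]
            rfl
          unfold pvTokenize
          simp only [List.foldl_cons]
          rw [hstep3]
          rw [pvTokFold_acc es (qOp e) none]
          rcases hT : es.foldl pvTokStep ([], none) with ⟨t1, t2⟩
          cases t2 <;> simp [pvTokFlush]
      · rw [show qScan (N + 1) (c :: cs) = qOp c ++ qScan N cs from by rw [qScan]; rw [if_neg (pvIfNeg (by simpa using hd))]]
        unfold pvTokenize
        simp only [List.foldl_cons]
        have hstep : pvTokStep ([], none) c = (qOp c, none) := by
          unfold pvTokStep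
          rw [if_neg (pvIfNeg (by simpa [qIsDigit] using hd))]
          rfl
        rw [hstep]
        rw [pvTokFold_acc cs (qOp c) none]
        have := ihN cs (by simp at hlen; omega)
        rw [this]
        unfold pvTokenize
        rcases hT : cs.foldl pvTokStep ([], none) with ⟨t1, t2⟩
        cases t2 <;> simp [pvTokFlush]

theorem qTokens_eq_pvTokenize (cs : List Char) : qTokens cs = pvTokenize cs :=
  qScan_eq_pvTokenize cs.length cs le_rfl

-- machine = parser (when the parser succeeds)
theorem pvMach (ss all) : ∀ fuel : Nat,
    (∀ ts v rest, qUnit ss all fuel ts = some (v, rest) →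
      ∀ (v0 : Option (List String)) sr (f : PvOpF) opr,
        pvRunM ss all ts (some (v0 :: sr, f :: opr))
          = pvRunM ss all rest ((f (some v)).map (fun r => (r :: sr, opr))))
    ∧ (∀ ts acc v rest, qFold ss all fuel acc ts = some (v, rest) →
      ∀ sr opr,
        pvRunM ss all ts (some (some acc :: sr, opr))
          = pvRunM ss all rest (some (some v :: sr, opr)))
    ∧ (∀ ts v rest, qExpr ss all fuel ts = some (v, rest) →
      ∀ (v0 : Option (List String)) sr opr,
        pvRunM ss all ts (some (v0 :: sr, pvOpId :: opr))
          = pvRunM ss all rest (some (some v :: sr, opr))) := by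
  intro fuel
  induction fuel with
  | zero =>
    refine ⟨?_, ?_, ?_⟩ <;> intro ts <;> intros <;> simp_all [qUnit, qFold, qExpr]
  | succ fuel ih =>
    obtain ⟨ihU, ihL, ihE⟩ := ih
    refine ⟨?_, ?_, ?_⟩
    · -- unit
      intro ts v rest h v0 sr f opr
      cases ts with
      | nil => simp [qUnit] at h
      | cons t ts2 =>
        cases t with
        | notT =>
          rw [show qUnit ss all (fuel + 1) (QTok.notT :: ts2)
              = (qUnit ss all fuel ts2).map (fun vr => (PySem.Set.diff all vr.1, vr.2)) from rfl] at h
          cases hu : qUnit ss all fuel ts2 with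
          | none => rw [hu] at h; exact absurd h (by simp)
          | some p =>
            rcases p with ⟨w, r1⟩
            rw [hu] at h
            simp only [Option.map_some, Option.some.injEq, Prod.mk.injEq] at h
            obtain ⟨hv, hrest⟩ := h
            subst hv hrest
            rw [pvRunM_cons]
            show pvRunM ss all ts2 (some (v0 :: sr, pvOpBang all f :: opr)) = _
            rw [ihU _ _ _ hu v0 sr (pvOpBang all f) opr]
            rfl
        | idx n =>
          rw [show qUnit ss all (fuel + 1) (QTok.idx n :: ts2)
              = (PySem.List.pyGet? ss (n : Int)).map (fun v => (v, ts2)) from rfl] at h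
          cases hg : PySem.List.pyGet? ss (n : Int) with
          | none => rw [hg] at h; exact absurd h (by simp)
          | some w =>
            rw [hg] at h
            simp only [Option.map_some, Option.some.injEq, Prod.mk.injEq] at h
            obtain ⟨hv, hrest⟩ := h
            subst hv hrest
            rw [pvRunM_cons]
            simp only [pvStepTok, hg]
        | lparen =>
          rw [show qUnit ss all (fuel + 1) (QTok.lparen :: ts2)
              = (qExpr ss all fuel ts2).bind (fun vr =>
                  match vr.2 with
                  | QTok.rparen :: rest => some (vr.1, rest)
                  | _ => none) from rfl] at h
          cases he : qExpr ss all fuel ts2 with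
          | none => rw [he] at h; exact absurd h (by simp)
          | some p =>
            rcases p with ⟨w, r1⟩
            rw [he] at h
            cases hr : r1 with
            | nil => rw [hr] at h; exact absurd h (by simp)
            | cons t2 r2 =>
              cases t2 with
              | idx n => rw [hr] at h; simp at h
              | andT => rw [hr] at h; simp at h
              | orT => rw [hr] at h; simp at h
              | notT => rw [hr] at h; simp at h
              | lparen => rw [hr] at h; simp at h
              | rparen =>
              rw [hr] at h
              simp at h
              obtain ⟨hv, hrest⟩ := h
              subst hv hrest
              rw [pvRunM_cons]
              show pvRunM ss all ts2 (some (none :: v0 :: sr, pvOpId :: f :: opr)) = _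
              rw [hr] at he
              rw [ihE _ _ _ he none (v0 :: sr) (f :: opr)]
              rw [pvRunM_cons]
              rfl
        | andT => simp [qUnit] at h
        | orT => simp [qUnit] at h
        | rparen => simp [qUnit] at h
    · -- fold loop
      intro ts acc v rest h sr opr
      cases ts with
      | nil =>
        rw [show qFold ss all (fuel + 1) acc ([] : List QTok) = some (acc, []) from rfl] at h
        simp only [Option.some.injEq, Prod.mk.injEq] at h
        obtain ⟨hv, hrest⟩ := h
        subst hv hrest
        rfl
      | cons t ts2 =>
        cases t with
        | andT =>
          rw [show qFold ss all (fuel + 1) acc (QTok.andT :: ts2)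
              = (qUnit ss all fuel ts2).bind (fun vr => qFold ss all fuel (PySem.Set.inter acc vr.1) vr.2) from rfl] at h
          cases hu : qUnit ss all fuel ts2 with
          | none => rw [hu] at h; exact absurd h (by simp)
          | some p =>
            rcases p with ⟨w, r1⟩
            rw [hu] at h
            simp only [Option.bind] at h
            rw [pvRunM_cons]
            show pvRunM ss all ts2 (some (some acc :: sr, pvOpInter acc :: opr)) = _
            rw [ihU _ _ _ hu (some acc) sr (pvOpInter acc) opr]
            show pvRunM ss all r1 (some (some (PySem.Set.inter acc w) :: sr, opr)) = _
            exact ihL _ _ _ _ h sr opr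
        | orT =>
          rw [show qFold ss all (fuel + 1) acc (QTok.orT :: ts2)
              = (qUnit ss all fuel ts2).bind (fun vr => qFold ss all fuel (PySem.Set.union acc vr.1) vr.2) from rfl] at h
          cases hu : qUnit ss all fuel ts2 with
          | none => rw [hu] at h; exact absurd h (by simp)
          | some p =>
            rcases p with ⟨w, r1⟩
            rw [hu] at h
            simp only [Option.bind] at h
            rw [pvRunM_cons]
            show pvRunM ss all ts2 (some (some acc :: sr, pvOpUnion acc :: opr)) = _
            rw [ihU _ _ _ hu (some acc) sr (pvOpUnion acc) opr]
            show pvRunM ss all r1 (some (some (PySem.Set.union acc w) :: sr, opr)) = _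
            exact ihL _ _ _ _ h sr opr
        | idx n =>
          rw [show qFold ss all (fuel + 1) acc (QTok.idx n :: ts2) = some (acc, QTok.idx n :: ts2) from rfl] at h
          simp only [Option.some.injEq, Prod.mk.injEq] at h
          obtain ⟨hv, hrest⟩ := h; subst hv hrest; rfl
        | notT =>
          rw [show qFold ss all (fuel + 1) acc (QTok.notT :: ts2) = some (acc, QTok.notT :: ts2) from rfl] at h
          simp only [Option.some.injEq, Prod.mk.injEq] at h
          obtain ⟨hv, hrest⟩ := h; subst hv hrest; rfl
        | lparen =>
          rw [show qFold ss all (fuel + 1) acc (QTok.lparen :: ts2) = some (acc, QTok.lparen :: ts2) from rfl] at h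
          simp only [Option.some.injEq, Prod.mk.injEq] at h
          obtain ⟨hv, hrest⟩ := h; subst hv hrest; rfl
        | rparen =>
          rw [show qFold ss all (fuel + 1) acc (QTok.rparen :: ts2) = some (acc, QTok.rparen :: ts2) from rfl] at h
          simp only [Option.some.injEq, Prod.mk.injEq] at h
          obtain ⟨hv, hrest⟩ := h; subst hv hrest; rfl
    · -- expr
      intro ts v rest h v0 sr opr
      rw [show qExpr ss all (fuel + 1) ts
          = (qUnit ss all fuel ts).bind (fun vr => qFold ss all fuel vr.1 vr.2) from rfl] at h
      cases hu : qUnit ss all fuel ts with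
      | none => rw [hu] at h; exact absurd h (by simp)
      | some p =>
        rcases p with ⟨w, rest1⟩
        rw [hu] at h
        simp only [Option.bind] at h
        rw [ihU ts w rest1 hu v0 sr pvOpId opr]
        show pvRunM ss all rest1 (some (some w :: sr, opr)) = _
        exact ihL rest1 w v rest h sr opr

-- completeness: on Pre_-shaped token streams the parser succeeds and consumes everything
def pvGood (ss : List (List String)) (ts : List QTok) (d : Int) : Prop :=
  pvChainOK ts = true ∧ ts.all (pvNumOK ss) = true
    ∧ ts.getLast?.all pvKindEnd = true ∧ pvBalanced d ts = true

theorem pvChainOK_tail {t : QTok} {ts : List QTok} (h : pvChainOK (t :: ts) = true) :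
    pvChainOK ts = true := by
  cases ts with
  | nil => rfl
  | cons b ts => simp only [pvChainOK, Bool.and_eq_true] at h; exact h.2

theorem pvChainOK_adj {a b : QTok} {ts : List QTok} (h : pvChainOK (a :: b :: ts) = true) :
    pvAdj a b = true := by
  simp only [pvChainOK, Bool.and_eq_true] at h; exact h.1

theorem pvLast_cons_ne {t : QTok} {ts : List QTok}
    (h : (t :: ts).getLast?.all pvKindEnd = true) (hne : ts ≠ []) :
    ts.getLast?.all pvKindEnd = true := by
  cases ts with
  | nil => exact absurd rfl hne
  | cons b ts => rwa [List.getLast?_cons_cons] at h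

theorem pvLast_cons_nil {t : QTok} {ts : List QTok}
    (h : (t :: ts).getLast?.all pvKindEnd = true) (hnil : ts = []) :
    pvKindEnd t = true := by
  subst hnil; simpa using h

theorem pvGood_tail {ss t ts d} (hg : pvGood ss (t :: ts) d)
    (hbal : pvBalanced d ts = true) : pvGood ss ts d ∨ ts = [] := by
  by_cases hne : ts = []
  · right; exact hne
  · left
    obtain ⟨hc, hn, hl, _⟩ := hg
    refine ⟨pvChainOK_tail hc, ?_, pvLast_cons_ne hl hne, hbal⟩
    simp only [List.all_cons, Bool.and_eq_true] at hn
    exact hn.2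

-- the main completeness induction (strong induction on the length bound N)
set_option maxHeartbeats 1000000 in
theorem pvCompl (ss all) : ∀ N : Nat, ∀ ts : List QTok, ts.length ≤ N → ∀ d : Int,
    ((ts ≠ [] → 0 ≤ d → ts.head?.all pvKindStart = true → pvGood ss ts d →
      ∃ v rest, (∀ fuel, 3 * ts.length + 1 ≤ fuel → qUnit ss all fuel ts = some (v, rest))
        ∧ rest.length < ts.length ∧ (pvGood ss rest d ∨ rest = [])
        ∧ rest.head?.all pvKindCont = true ∧ pvBalanced d rest = true)
    ∧ (ts.head?.all pvKindCont = true → 0 ≤ d → (pvGood ss ts d ∨ ts = []) → pvBalanced d ts = true →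
      ∀ acc : List String,
      ∃ v rest, (∀ fuel, 3 * ts.length + 2 ≤ fuel → qFold ss all fuel acc ts = some (v, rest))
        ∧ rest.length ≤ ts.length ∧ (rest = [] ∨ rest.head? = some QTok.rparen)
        ∧ (pvGood ss rest d ∨ rest = []) ∧ pvBalanced d rest = true))
    ∧ (ts ≠ [] → 0 ≤ d → ts.head?.all pvKindStart = true → pvGood ss ts d →
      ∃ v rest, (∀ fuel, 3 * ts.length + 3 ≤ fuel → qExpr ss all fuel ts = some (v, rest))
        ∧ rest.length < ts.length ∧ (rest = [] ∨ rest.head? = some QTok.rparen)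
        ∧ (pvGood ss rest d ∨ rest = []) ∧ pvBalanced d rest = true) := by
  intro N
  induction N with
  | zero =>
    intro ts hlen d
    have : ts = [] := by cases ts <;> simp_all
    subst this
    refine ⟨⟨?_, ?_⟩, ?_⟩
    · intro hne; exact absurd rfl hne
    · intro _ _ _ hbal acc
      refine ⟨acc, [], ?_, ?_, ?_, ?_, ?_⟩
      · intro fuel hf
        obtain ⟨f, rfl⟩ : ∃ f, fuel = f + 1 := ⟨fuel - 1, by omega⟩
        rfl
      · simp
      · left; rfl
      · right; rfl
      · exact hbal
    · intro hne; exact absurd rfl hne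
  | succ N ihN =>
    intro ts hlenN d
    by_cases hsh : ts.length ≤ N
    · exact ihN ts hsh d
    have hlen : ts.length = N + 1 := by omega
    -- SU for this ts
    have SU : ts ≠ [] → 0 ≤ d → ts.head?.all pvKindStart = true → pvGood ss ts d →
        ∃ v rest, (∀ fuel, 3 * ts.length + 1 ≤ fuel → qUnit ss all fuel ts = some (v, rest))
          ∧ rest.length < ts.length ∧ (pvGood ss rest d ∨ rest = [])
          ∧ rest.head?.all pvKindCont = true ∧ pvBalanced d rest = true := by
      intro hne hd hstart hgood
      obtain ⟨hchain, hnums, hlast, hbal⟩ := hgood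
      cases ts with
      | nil => exact absurd rfl hne
      | cons t ts2 =>
        cases t with
        | idx n =>
          have hn : n < ss.length := by
            have := hnums
            simp only [List.all_cons, Bool.and_eq_true] at this
            simpa [pvNumOK] using this.1
          have hget : PySem.List.pyGet? ss ((n : Nat) : Int) = some ss[n] := by
            rw [PySem.List.pyGet?_natCast]
            simp [hn]
          have hbal2 : pvBalanced d ts2 = true := by simpa [pvBalanced] using hbal
          refine ⟨ss[n], ts2, ?_, by simp, ?_, ?_, hbal2⟩
          · intro fuel hf
            obtain ⟨f, rfl⟩ : ∃ f, fuel = f + 1 := ⟨fuel - 1, by omega⟩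
            rw [show qUnit ss all (f + 1) (QTok.idx n :: ts2)
                = (PySem.List.pyGet? ss (n : Int)).map (fun v => (v, ts2)) from rfl, hget]
            rfl
          · exact pvGood_tail ⟨hchain, hnums, hlast, hbal⟩ hbal2
          · cases ts2 with
            | nil => rfl
            | cons b ts3 =>
              have := pvChainOK_adj hchain
              simpa [pvAdj] using this
        | notT =>
          have hne2 : ts2 ≠ [] := by
            intro hnil
            have := pvLast_cons_nil hlast hnil
            simp [pvKindEnd] at this
          have hstart2 : ts2.head?.all pvKindStart = true := by
            cases ts2 with
            | nil => exact absurd rfl hne2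
            | cons b ts3 => simpa [pvAdj] using pvChainOK_adj hchain
          have hbal2 : pvBalanced d ts2 = true := by simpa [pvBalanced] using hbal
          have hgood2 : pvGood ss ts2 d :=
            ⟨pvChainOK_tail hchain, by simp only [List.all_cons, Bool.and_eq_true] at hnums; exact hnums.2, pvLast_cons_ne hlast hne2, hbal2⟩
          obtain ⟨v2, rest, hpar, hlen2, hg2, hcont2, hbal3⟩ :=
            ((ihN ts2 (by simp at hlen ⊢; omega) d).1).1 hne2 hd hstart2 hgood2
          refine ⟨PySem.Set.diff all v2, rest, ?_, by simp; omega, hg2, hcont2, hbal3⟩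
          intro fuel hf
          obtain ⟨f, rfl⟩ : ∃ f, fuel = f + 1 := ⟨fuel - 1, by omega⟩
          rw [show qUnit ss all (f + 1) (QTok.notT :: ts2)
              = (qUnit ss all f ts2).map (fun vr => (PySem.Set.diff all vr.1, vr.2)) from rfl]
          rw [hpar f (by simp at hf ⊢; omega)]
          rfl
        | lparen =>
          have hne2 : ts2 ≠ [] := by
            intro hnil
            have := pvLast_cons_nil hlast hnil
            simp [pvKindEnd] at this
          have hstart2 : ts2.head?.all pvKindStart = true := by
            cases ts2 with
            | nil => exact absurd rfl hne2
            | cons b ts3 => simpa [pvAdj] using pvChainOK_adj hchain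
          have hbal2 : pvBalanced (d + 1) ts2 = true := by simpa [pvBalanced] using hbal
          have hgood2 : pvGood ss ts2 (d + 1) :=
            ⟨pvChainOK_tail hchain, by simp only [List.all_cons, Bool.and_eq_true] at hnums; exact hnums.2, pvLast_cons_ne hlast hne2, hbal2⟩
          obtain ⟨v2, rest, hpar, hlen2, hshape, hg2, hbal3⟩ :=
            (ihN ts2 (by simp at hlen ⊢; omega) (d + 1)).2 hne2 (by omega) hstart2 hgood2
          -- rest must start with rparen
          rcases hshape with hnil | hhead
          · exfalso
            rw [hnil] at hbal3
            simp only [pvBalanced, beq_iff_eq] at hbal3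
            omega
          · rcases rest with _ | ⟨t2, rest2⟩
            · simp at hhead
            · have ht2 : t2 = QTok.rparen := by simpa using hhead
              subst ht2
              have hbal4 : pvBalanced d rest2 = true := by
                simp only [pvBalanced, Bool.and_eq_true] at hbal3
                have he : d + 1 - 1 = d := by omega
                rw [he] at hbal3
                exact hbal3.2
              have hg3 : pvGood ss rest2 d ∨ rest2 = [] := by
                rcases hg2 with ⟨hc2, hn2, hl2, _⟩ | hg2
                · by_cases hnil : rest2 = []
                  · right; exact hnil
                  · left
                    refine ⟨pvChainOK_tail hc2, ?_, pvLast_cons_ne hl2 hnil, hbal4⟩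
                    simp only [List.all_cons, Bool.and_eq_true] at hn2
                    exact hn2.2
                · simp at hg2
              have hcont2 : rest2.head?.all pvKindCont = true := by
                rcases hg2 with hg2 | hg2
                · cases rest2 with
                  | nil => rfl
                  | cons b ts3 => simpa [pvAdj] using pvChainOK_adj hg2.1
                · simp at hg2
              refine ⟨v2, rest2, ?_, ?_, hg3, hcont2, hbal4⟩
              · intro fuel hf
                obtain ⟨f, rfl⟩ : ∃ f, fuel = f + 1 := ⟨fuel - 1, by omega⟩
                rw [show qUnit ss all (f + 1) (QTok.lparen :: ts2)
                    = (qExpr ss all f ts2).bind (fun vr =>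
                        match vr.2 with
                        | QTok.rparen :: rest => some (vr.1, rest)
                        | _ => none) from rfl]
                rw [hpar f (by simp at hf ⊢; omega)]
                rfl
              · simp at hlen2 ⊢; omega
        | andT => simp [pvKindStart] at hstart
        | orT => simp [pvKindStart] at hstart
        | rparen => simp [pvKindStart] at hstart
    -- SL for this ts
    have SL : ts.head?.all pvKindCont = true → 0 ≤ d → (pvGood ss ts d ∨ ts = []) → pvBalanced d ts = true →
        ∀ acc : List String,
        ∃ v rest, (∀ fuel, 3 * ts.length + 2 ≤ fuel → qFold ss all fuel acc ts = some (v, rest))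
          ∧ rest.length ≤ ts.length ∧ (rest = [] ∨ rest.head? = some QTok.rparen)
          ∧ (pvGood ss rest d ∨ rest = []) ∧ pvBalanced d rest = true := by
      intro hcont hd hgood hbal acc
      cases ts with
      | nil =>
        refine ⟨acc, [], ?_, by simp, Or.inl rfl, Or.inr rfl, hbal⟩
        intro fuel hf
        obtain ⟨f, rfl⟩ : ∃ f, fuel = f + 1 := ⟨fuel - 1, by omega⟩
        rfl
      | cons t ts2 =>
        rcases hgood with hgood | hgood
        swap
        · simp at hgood
        obtain ⟨hchain, hnums, hlast, _⟩ := hgood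
        have hc : pvKindCont t = true := by simpa using hcont
        have hop : t = QTok.andT ∨ t = QTok.orT ∨ t = QTok.rparen := by
          cases t with
          | andT => exact Or.inl rfl
          | orT => exact Or.inr (Or.inl rfl)
          | rparen => exact Or.inr (Or.inr rfl)
          | idx n => simp [pvKindCont] at hc
          | notT => simp [pvKindCont] at hc
          | lparen => simp [pvKindCont] at hc
        rcases hop with rfl | rfl | rfl
        · -- '&'
          have hne2 : ts2 ≠ [] := by
            intro hnil; have := pvLast_cons_nil hlast hnil; simp [pvKindEnd] at this
          have hstart2 : ts2.head?.all pvKindStart = true := by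
            cases ts2 with
            | nil => exact absurd rfl hne2
            | cons b ts3 => simpa [pvAdj] using pvChainOK_adj hchain
          have hbal2 : pvBalanced d ts2 = true := by simpa [pvBalanced] using hbal
          have hgood2 : pvGood ss ts2 d :=
            ⟨pvChainOK_tail hchain, by simp only [List.all_cons, Bool.and_eq_true] at hnums; exact hnums.2, pvLast_cons_ne hlast hne2, hbal2⟩
          obtain ⟨w, rest1, hparU, hlenU, hgU, hcontU, hbalU⟩ :=
            ((ihN ts2 (by simp at hlen ⊢; omega) d).1).1 hne2 hd hstart2 hgood2
          obtain ⟨v, rest, hparL, hlenL, hshapeL, hgL, hbalL⟩ :=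
            ((ihN rest1 (by simp at hlen hlenU ⊢; omega) d).1).2 hcontU hd hgU hbalU
              (PySem.Set.inter acc w)
          refine ⟨v, rest, ?_, by simp at hlenU ⊢; omega, hshapeL, hgL, hbalL⟩
          intro fuel hf
          obtain ⟨f, rfl⟩ : ∃ f, fuel = f + 1 := ⟨fuel - 1, by omega⟩
          rw [show qFold ss all (f + 1) acc (QTok.andT :: ts2)
              = (qUnit ss all f ts2).bind (fun vr => qFold ss all f (PySem.Set.inter acc vr.1) vr.2) from rfl]
          rw [hparU f (by simp at hf ⊢; omega)]
          simp only [Option.bind]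
          exact hparL f (by simp at hf hlenU ⊢; omega)
        · -- '|'
          have hne2 : ts2 ≠ [] := by
            intro hnil; have := pvLast_cons_nil hlast hnil; simp [pvKindEnd] at this
          have hstart2 : ts2.head?.all pvKindStart = true := by
            cases ts2 with
            | nil => exact absurd rfl hne2
            | cons b ts3 => simpa [pvAdj] using pvChainOK_adj hchain
          have hbal2 : pvBalanced d ts2 = true := by simpa [pvBalanced] using hbal
          have hgood2 : pvGood ss ts2 d :=
            ⟨pvChainOK_tail hchain, by simp only [List.all_cons, Bool.and_eq_true] at hnums; exact hnums.2, pvLast_cons_ne hlast hne2, hbal2⟩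
          obtain ⟨w, rest1, hparU, hlenU, hgU, hcontU, hbalU⟩ :=
            ((ihN ts2 (by simp at hlen ⊢; omega) d).1).1 hne2 hd hstart2 hgood2
          obtain ⟨v, rest, hparL, hlenL, hshapeL, hgL, hbalL⟩ :=
            ((ihN rest1 (by simp at hlen hlenU ⊢; omega) d).1).2 hcontU hd hgU hbalU
              (PySem.Set.union acc w)
          refine ⟨v, rest, ?_, by simp at hlenU ⊢; omega, hshapeL, hgL, hbalL⟩
          intro fuel hf
          obtain ⟨f, rfl⟩ : ∃ f, fuel = f + 1 := ⟨fuel - 1, by omega⟩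
          rw [show qFold ss all (f + 1) acc (QTok.orT :: ts2)
              = (qUnit ss all f ts2).bind (fun vr => qFold ss all f (PySem.Set.union acc vr.1) vr.2) from rfl]
          rw [hparU f (by simp at hf ⊢; omega)]
          simp only [Option.bind]
          exact hparL f (by simp at hf hlenU ⊢; omega)
        · -- ')': stop
          refine ⟨acc, QTok.rparen :: ts2, ?_, le_rfl, Or.inr rfl, Or.inl ⟨hchain, hnums, hlast, hbal⟩, hbal⟩
          intro fuel hf
          obtain ⟨f, rfl⟩ : ∃ f, fuel = f + 1 := ⟨fuel - 1, by omega⟩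
          rfl
    -- SE for this ts
    have SE : ts ≠ [] → 0 ≤ d → ts.head?.all pvKindStart = true → pvGood ss ts d →
        ∃ v rest, (∀ fuel, 3 * ts.length + 3 ≤ fuel → qExpr ss all fuel ts = some (v, rest))
          ∧ rest.length < ts.length ∧ (rest = [] ∨ rest.head? = some QTok.rparen)
          ∧ (pvGood ss rest d ∨ rest = []) ∧ pvBalanced d rest = true := by
      intro hne hd hstart hgood
      obtain ⟨v1, rest1, hpar1, hlen1, hg1, hcont1, hbal1⟩ := SU hne hd hstart hgood
      obtain ⟨v, rest, hpar2, hlen2, hshape, hg2, hbal2⟩ :=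
        (ihN rest1 (by omega) d).1.2 hcont1 hd hg1 hbal1 v1
      refine ⟨v, rest, ?_, by omega, hshape, hg2, hbal2⟩
      intro fuel hf
      obtain ⟨f, rfl⟩ : ∃ f, fuel = f + 1 := ⟨fuel - 1, by omega⟩
      rw [show qExpr ss all (f + 1) ts
          = (qUnit ss all f ts).bind (fun vr => qFold ss all f vr.1 vr.2) from rfl]
      rw [hpar1 f (by omega)]
      simp only [Option.bind]
      exact hpar2 f (by omega)
    exact ⟨⟨SU, SL⟩, SE⟩

theorem pvRunBangLp (ss all) : ∀ ts : List QTok,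
    ts.all (fun t => t == QTok.notT || t == QTok.lparen) = true →
    ∀ sm (f : PvOpF) ops, ∃ sm' f' ops',
      pvRunM ss all ts (some (none :: sm, f :: ops)) = some (none :: sm', f' :: ops') := by
  intro ts
  induction ts with
  | nil => intro _ sm f ops; exact ⟨sm, f, ops, rfl⟩
  | cons t ts ih =>
    intro hall sm f ops
    simp only [List.all_cons, Bool.and_eq_true] at hall
    have ht : t = QTok.notT ∨ t = QTok.lparen := by
      cases t <;> simp_all
    rcases ht with rfl | rfl
    · rw [pvRunM_cons]
      exact ih hall.2 sm (pvOpBang all f) ops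
    · rw [pvRunM_cons]
      exact ih hall.2 (none :: sm) pvOpId (f :: ops)

theorem qUnit_anyIdx (ss all) : ∀ fuel : Nat, ∀ ts (v : List String) rest,
    qUnit ss all fuel ts = some (v, rest) → ts.any qIsIdx = true := by
  intro fuel
  induction fuel using Nat.strong_induction_on with
  | _ fuel ih =>
    intro ts v rest h
    cases fuel with
    | zero => simp [qUnit] at h
    | succ f =>
      cases ts with
      | nil => simp [qUnit] at h
      | cons t ts2 =>
        cases t with
        | idx n => simp [qIsIdx]
        | notT =>
          rw [show qUnit ss all (f + 1) (QTok.notT :: ts2)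
              = (qUnit ss all f ts2).map (fun vr => (PySem.Set.diff all vr.1, vr.2)) from rfl] at h
          cases hu : qUnit ss all f ts2 with
          | none => rw [hu] at h; exact absurd h (by simp)
          | some p =>
            have := ih f (by omega) ts2 p.1 p.2 (by rw [hu])
            simp only [List.any_cons, Bool.or_eq_true]
            exact Or.inr this
        | lparen =>
          rw [show qUnit ss all (f + 1) (QTok.lparen :: ts2)
              = (qExpr ss all f ts2).bind (fun vr =>
                  match vr.2 with
                  | QTok.rparen :: rest => some (vr.1, rest)
                  | _ => none) from rfl] at h
          cases he : qExpr ss all f ts2 with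
          | none => rw [he] at h; exact absurd h (by simp)
          | some p =>
            cases f with
            | zero => simp [qExpr] at he
            | succ f2 =>
              rw [show qExpr ss all (f2 + 1) ts2
                  = (qUnit ss all f2 ts2).bind (fun vr => qFold ss all f2 vr.1 vr.2) from rfl] at he
              cases hu : qUnit ss all f2 ts2 with
              | none => rw [hu] at he; simp at he
              | some q =>
                have := ih f2 (by omega) ts2 q.1 q.2 (by rw [hu])
                simp only [List.any_cons, Bool.or_eq_true]
                exact Or.inr this
        | andT => simp [qUnit] at h
        | orT => simp [qUnit] at h
        | rparen => simp [qUnit] at h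

theorem combine_queries_spec : Claim_equal_combine_queries := by
  unfold Claim_equal_combine_queries
  intro ss qc all _dom hpre
  unfold Spec_combine_queries
  unfold Pre_combine_queries at hpre
  simp only [Bool.or_eq_true] at hpre
  have hbridge : qTokens qc.toList = pvTokenize qc.toList :=
    qTokens_eq_pvTokenize qc.toList
  have hA : combine_queries ss qc all
      = pvMFinish (pvRunM ss all (pvTokenize qc.toList) (some ([none], [pvOpId]))) := by
    have h := pvCharTok ss all qc.toList [none] [pvOpId] []
    unfold combine_queries
    rw [h]
    rfl
  unfold combine_queries_alt
  rw [hbridge]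
  rcases hpre with hpre | hbl
  · -- well-formed expression
    unfold pvGrammarOK at hpre
    simp only [Bool.and_eq_true] at hpre
    obtain ⟨⟨⟨⟨hnums, hstart⟩, hlast⟩, hchain⟩, hbal⟩ := hpre
    cases hts : pvTokenize qc.toList with
    | nil =>
      rw [hA, hts]
      simp [pvRunM, pvMFinish]
    | cons t ts0 =>
      rw [hts] at hnums hstart hlast hchain hbal
      obtain ⟨v, rest, hfuel, _, hshape, _, hbalr⟩ :=
        ((pvCompl ss all (t :: ts0).length (t :: ts0) le_rfl 0).2) (by simp) (by norm_num)
          hstart ⟨hchain, hnums, hlast, hbal⟩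
      have hrest : rest = [] := by
        rcases hshape with h | h
        · exact h
        · exfalso
          rcases rest with _ | ⟨t2, r2⟩
          · simp at h
          · have ht2 : t2 = QTok.rparen := by simpa using h
            subst ht2
            simp [pvBalanced] at hbalr
      subst hrest
      have hpe := hfuel (3 * (t :: ts0).length + 3) le_rfl
      have hm := (pvMach ss all (3 * (t :: ts0).length + 3)).2.2 (t :: ts0) v [] hpe
        none [] []
      have hanyt : ((t :: ts0).any qIsIdx) = true := by
        have hpe2 := hpe
        obtain ⟨f2, hf2⟩ : ∃ f2, 3 * (t :: ts0).length + 3 = f2 + 1 := ⟨3 * (t :: ts0).length + 2, rfl⟩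
        rw [hf2] at hpe2
        rw [show qExpr ss all (f2 + 1) (t :: ts0)
            = (qUnit ss all f2 (t :: ts0)).bind (fun vr => qFold ss all f2 vr.1 vr.2) from rfl] at hpe2
        cases hu : qUnit ss all f2 (t :: ts0) with
        | none => rw [hu] at hpe2; simp at hpe2
        | some p => exact qUnit_anyIdx ss all _ _ p.1 p.2 (by rw [hu])
      rw [hA, hts, hm]
      simp only [hanyt, Bool.not_true, Bool.false_eq_true, if_false, hpe]
      rfl
  · -- only '!' and '(' tokens: both sides return None
    have hany : (pvTokenize qc.toList).any qIsIdx = false := by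
      simp only [List.any_eq_false]
      intro x hx
      have hx2 := (List.all_eq_true.mp hbl) x hx
      cases x <;> simp_all [qIsIdx]
    obtain ⟨sm', f', ops', hrun⟩ := pvRunBangLp ss all (pvTokenize qc.toList) hbl [] pvOpId []
    rw [hA, hrun]
    simp [pvMFinish, hany]
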